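-- pv_equiv track=rewrite | github.com/gl-chandan/GA-RM | combined_runner.py | min_min_scheduler
-- ===== SOURCE A (Python) =====
-- def min_min_scheduler(task_times, num_vms):
--     task_list = list(range(len(task_times)))
--     vm_loads = [0] * num_vms
--     allocation = [-1] * len(task_times)
--     while task_list:
--         min_completion = float('inf')
--         best_task, best_vm = None, None
--         for task in task_list:
--             for vm in range(num_vms):
--                 completion = vm_loads[vm] + task_times[task]
--                 if completion < min_completion:
--                     min_completion = completion
--                     best_task, best_vm = task, vm
--         allocation[best_task] = best_vm
--         vm_loads[best_vm] += task_times[best_task]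
--         task_list.remove(best_task)
--     return allocation, max(vm_loads)
-- ===== SOURCE B (Python) =====
-- def min_min_scheduler(task_times, num_vms):
--     # Sort tasks once by duration (stable), then greedily give each to the
--     # currently least-loaded VM (first such VM) -- same schedule, one pass.
--     order = sorted(range(len(task_times)), key=lambda i: task_times[i])
--     vm_loads = [0] * num_vms
--     allocation = [-1] * len(task_times)
--     for i in order:
--         vm = vm_loads.index(min(vm_loads))
--         allocation[i] = vm
--         vm_loads[vm] += task_times[i]
--     return allocation, max(vm_loads)
-- ===== Notes on version B (the rewrite author's own statement) =====
-- stated objective: faster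
-- what changed: A rescans all remaining (task, vm) pairs every round; B sorts the task indices once by duration (stable) and assigns each, in that order, to the first least-loaded VM, removing the nested rescan.
import Mathlib
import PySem

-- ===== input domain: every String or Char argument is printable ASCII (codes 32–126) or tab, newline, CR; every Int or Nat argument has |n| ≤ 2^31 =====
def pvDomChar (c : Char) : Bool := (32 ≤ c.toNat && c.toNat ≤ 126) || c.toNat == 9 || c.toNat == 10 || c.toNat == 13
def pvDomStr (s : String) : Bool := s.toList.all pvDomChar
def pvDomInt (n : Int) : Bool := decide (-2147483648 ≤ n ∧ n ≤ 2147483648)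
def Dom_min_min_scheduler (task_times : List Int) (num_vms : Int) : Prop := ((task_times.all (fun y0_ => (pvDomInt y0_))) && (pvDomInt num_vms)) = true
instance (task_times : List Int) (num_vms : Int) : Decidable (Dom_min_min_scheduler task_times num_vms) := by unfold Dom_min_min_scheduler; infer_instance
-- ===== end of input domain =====

-- B replaces A's repeated scan over all remaining (task, vm) pairs by sorting the
-- tasks once and assigning each to the first least-loaded VM (objective: faster).

-- ===== PORT A =====
-- 'completion < min_completion' where min_completion starts as float('inf'): none = inf
def aLt (c : Int) : Option Int → Bool
  | none => true
  | some m => decide (c < m)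

-- the nested 'for task in task_list: for vm in range(num_vms)' scan of one while-iteration;
-- state = (min_completion, best_task, best_vm).  'for vm in range(num_vms): ... vm_loads[vm]'
-- walks exactly the (index, value) pairs of vm_loads (len(vm_loads) = num_vms throughout,
-- and for num_vms < 0 both range(num_vms) and vm_loads are empty), so it is ported as a
-- fold over vm_loads carrying the running vm counter; each vm_loads[vm] access is exact.
def aScan (ts : List Int) (V : List Int) (L : List Int) :
    Option Int × Option Int × Option Int :=
  L.foldl (fun s task =>
      (V.foldl (fun (p : (Option Int × Option Int × Option Int) × Int) load =>
          (if aLt (load + PySem.List.pyGetD ts task 0) p.1.1 then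
            (some (load + PySem.List.pyGetD ts task 0), some task, some p.2)
          else p.1, p.2 + 1)) (s, 0)).1)
    (none, none, none)

-- the 'while task_list' loop; fuel = initial task_list length (one task is removed per round).
-- All indices used by .set/.modify/pyGetD are provably nonnegative and in range here.
def aLoop (ts : List Int) : Nat → List Int → List Int → List Int → List Int × List Int
  | 0, _, V, alloc => (alloc, V)
  | fuel+1, L, V, alloc =>
    if L.isEmpty then (alloc, V)
    else
      match aScan ts V L with
      | (_, some bt, some bv) =>
          aLoop ts fuel ((PySem.List.remove? L bt).getD L)
            (V.modify bv.toNat (· + PySem.List.pyGetD ts bt 0))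
            (alloc.set bt.toNat bv)
      | _ => (alloc, V)   -- best_task is None: Python raises TypeError (excluded by Pre_)

def min_min_scheduler (task_times : List Int) (num_vms : Int) : List Int × Int :=
  let task_list := PySem.List.pyRange 0 (task_times.length : Int) 1
  let p := aLoop task_times task_list.length task_list
      (List.replicate num_vms.toNat 0) (List.replicate task_times.length (-1))
  (p.1, (PySem.List.max? p.2 (fun x => x)).getD 0)   -- max(vm_loads); nonempty under Pre_

-- ===== PORT B =====
-- 'for i in order: vm = vm_loads.index(min(vm_loads)); allocation[i] = vm; vm_loads[vm] += task_times[i]'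
def bLoop (ts : List Int) : List Int → List Int → List Int → List Int × List Int
  | [], V, alloc => (alloc, V)
  | i :: rest, V, alloc =>
      let vm := (PySem.List.index? V ((PySem.List.min? V (fun x => x)).getD 0)).getD 0
      bLoop ts rest (V.modify vm (· + PySem.List.pyGetD ts i 0)) (alloc.set i.toNat (vm : Int))

def min_min_scheduler_alt (task_times : List Int) (num_vms : Int) : List Int × Int :=
  let order := PySem.List.sorted (PySem.List.pyRange 0 (task_times.length : Int) 1)
      (fun i => PySem.List.pyGetD task_times i 0) false
  let p := bLoop task_times order (List.replicate num_vms.toNat 0)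
      (List.replicate task_times.length (-1))
  (p.1, (PySem.List.max? p.2 (fun x => x)).getD 0)

-- ===== PRECONDITION & SPEC =====
-- Pre_ excludes exactly num_vms ≤ 0, where A raises (TypeError on a nonempty task list,
-- ValueError from max([]) on an empty one); B raises there too (min/max of an empty list).
def Pre_min_min_scheduler (task_times : List Int) (num_vms : Int) : Prop := 1 ≤ num_vms
instance (task_times : List Int) (num_vms : Int) : Decidable (Pre_min_min_scheduler task_times num_vms) := by unfold Pre_min_min_scheduler; infer_instance
def pvWitness_min_min_scheduler : List Int × Int := ([3, 1, 2, 1], 2)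

def Spec_min_min_scheduler (task_times : List Int) (num_vms : Int) (out : List Int × Int) : Prop := out = min_min_scheduler_alt task_times num_vms
instance (task_times : List Int) (num_vms : Int) (out : List Int × Int) : Decidable (Spec_min_min_scheduler task_times num_vms out) := by unfold Spec_min_min_scheduler; infer_instance

-- ===== CLAIM (what is proved, stated in full; the proofs are below) =====
def Claim_equal_min_min_scheduler : Prop := ∀ (task_times : List Int) (num_vms : Int), Dom_min_min_scheduler task_times num_vms → Pre_min_min_scheduler task_times num_vms → Spec_min_min_scheduler task_times num_vms (min_min_scheduler task_times num_vms)

-- ===== LEMMAS AND PROOFS =====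
def mstep {α : Type} (key : α → Int) (acc : Option α) (x : α) : Option α :=
  match acc with
  | none => some x
  | some m => if key x < key m then some x else some m

theorem min?_eq_foldl {α : Type} (key : α → Int) (xs : List α) :
    PySem.List.min? xs key = xs.foldl (mstep key) none := by
  unfold PySem.List.min?
  congr 1

theorem min?_foldl_some {α : Type} (key : α → Int) (t : List α) :
    ∀ a, List.foldl (mstep key) (some a) t
      = some ((PySem.List.min? t key).elim a fun m => if key m < key a then m else a) := by
  induction t with
  | nil => intro a; simp [PySem.List.min?]
  | cons y t ih =>
    intro a
    have hmin : PySem.List.min? (y :: t) key = List.foldl (mstep key) (some y) t := by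
      rw [min?_eq_foldl, List.foldl_cons]; rfl
    rw [List.foldl_cons]
    show List.foldl _ (if key y < key a then some y else some a) t = _
    rcases hm : PySem.List.min? t key with _ | m
    · have ht : t = [] := (PySem.List.min?_eq_none_iff t key).mp hm
      subst ht
      have h1 : PySem.List.min? [y] key = some y := rfl
      simp only [List.foldl_nil, h1, Option.elim_some]
      split_ifs <;> rfl
    · have h2 : PySem.List.min? (y :: t) key = some (if key m < key y then m else y) := by
        rw [hmin, ih y, hm, Option.elim_some]
      by_cases hy : key y < key a
      · rw [if_pos hy, ih y, hm, h2]
        simp only [Option.elim_some]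
        split_ifs <;> first | rfl | omega
      · rw [if_neg hy, ih a, hm, h2]
        simp only [Option.elim_some]
        split_ifs <;> first | rfl | omega

theorem min?_cons_elim {α : Type} (key : α → Int) (x : α) (t : List α) :
    PySem.List.min? (x :: t) key
      = some ((PySem.List.min? t key).elim x (fun m => if key m < key x then m else x)) := by
  rw [min?_eq_foldl, List.foldl_cons]
  show List.foldl (mstep key) (some x) t = _
  rw [min?_foldl_some]

def ami : List Int → Option (Int × Nat)
  | [] => none
  | x :: t =>
    some (match ami t with
          | none => (x, 0)
          | some (m, i) => if m < x then (m, i + 1) else (x, 0))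

theorem ami_min? (V : List Int) : ∀ (m : Int) (i : Nat), ami V = some (m, i) →
    PySem.List.min? V (fun x => x) = some m := by
  induction V with
  | nil => intro m i h; simp [ami] at h
  | cons x t ih =>
    intro m i h
    rw [min?_cons_elim]
    rcases ht : ami t with _ | ⟨m', i'⟩
    · have htn : t = [] := by cases t <;> simp_all [ami]
      subst htn
      simp only [ami] at h
      rw [Option.some_inj] at h
      obtain ⟨h1, h2⟩ := Prod.mk.injEq .. ▸ h
      subst h1
      simp [PySem.List.min?]
    · have hm' := ih m' i' ht
      rw [hm', Option.elim_some]
      simp only [ami, ht] at h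
      rw [Option.some_inj] at h
      split_ifs at h with hlt
      · obtain ⟨h1, h2⟩ := Prod.mk.injEq .. ▸ h
        subst h1
        rw [if_pos hlt]
      · obtain ⟨h1, h2⟩ := Prod.mk.injEq .. ▸ h
        subst h1
        rw [if_neg hlt]

theorem ami_index? (V : List Int) : ∀ (m : Int) (i : Nat), ami V = some (m, i) →
    PySem.List.index? V m = some i := by
  induction V with
  | nil => intro m i h; simp [ami] at h
  | cons x t ih =>
    intro m i h
    rcases ht : ami t with _ | ⟨m', i'⟩
    · have htn : t = [] := by cases t <;> simp_all [ami]
      subst htn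
      simp only [ami] at h
      rw [Option.some_inj] at h
      obtain ⟨h1, h2⟩ := Prod.mk.injEq .. ▸ h
      subst h1; subst h2
      exact PySem.List.index?_cons_self x []
    · simp only [ami, ht] at h
      rw [Option.some_inj] at h
      split_ifs at h with hlt
      · obtain ⟨h1, h2⟩ := Prod.mk.injEq .. ▸ h
        subst h1; subst h2
        rw [PySem.List.index?_cons_of_ne t (by omega), ih m' i' ht]
        rfl
      · obtain ⟨h1, h2⟩ := Prod.mk.injEq .. ▸ h
        subst h1; subst h2
        exact PySem.List.index?_cons_self x t

theorem enum_fold (τ t0 : Int) (V : List Int) : ∀ (m : Int) (i : Nat), ami V = some (m, i) →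
    ∀ (k : Int) (s : Option Int × Option Int × Option Int),
      (V.foldl (fun (p : (Option Int × Option Int × Option Int) × Int) load =>
          (if aLt (load + τ) p.1.1 then (some (load + τ), some t0, some p.2) else p.1, p.2 + 1))
        (s, k)).1
        = if aLt (m + τ) s.1 then (some (m + τ), some t0, some (k + (i : Int))) else s := by
  induction V with
  | nil => intro m i h; simp [ami] at h
  | cons x t ih =>
    intro m i h k s
    rcases ht : ami t with _ | ⟨m', i'⟩
    · have htn : t = [] := by cases t <;> simp_all [ami]
      subst htn
      simp only [ami] at h
      rw [Option.some_inj] at h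
      obtain ⟨h1, h2⟩ := Prod.mk.injEq .. ▸ h
      subst h1; subst h2
      simp only [List.foldl_cons, List.foldl_nil]
      simp
    · simp only [ami, ht] at h
      rw [Option.some_inj] at h
      rw [List.foldl_cons]
      have hrw := ih m' i' ht (k + 1)
          (if aLt (x + τ) s.1 then (some (x + τ), some t0, some k) else s)
      show (List.foldl _ ((if aLt (x + τ) s.1 then (some (x + τ), some t0, some k) else s, k + 1) :
          (Option Int × Option Int × Option Int) × Int) t).1 = _
      rw [hrw]
      clear hrw ih
      rcases s with ⟨mc, bt, bv⟩
      split_ifs at h with hlt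
      · obtain ⟨h1, h2⟩ := Prod.mk.injEq .. ▸ h
        subst h1; subst h2
        cases mc with
        | none =>
          have c1 : aLt (x + τ) (none : Option Int) = true := rfl
          have c2 : aLt (m' + τ) (some (x + τ)) = true := by simp [aLt]; omega
          simp only [c1, if_pos, c2]
          simp [aLt]
          omega
        | some c =>
          by_cases hx : x + τ < c
          · simp only [aLt, decide_eq_true_eq, if_pos hx]
            have c2 : m' + τ < x + τ := by omega
            simp only [if_pos c2]
            have c3 : m' + τ < c := by omega
            simp [c3]
            omega
          · simp only [aLt, decide_eq_true_eq, if_neg hx]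
            split_ifs <;> simp
            omega
      · obtain ⟨h1, h2⟩ := Prod.mk.injEq .. ▸ h
        subst h1; subst h2
        cases mc with
        | none =>
          have c2 : ¬ (m' + τ < x + τ) := by omega
          simp [aLt, c2]
        | some c =>
          by_cases hx : x + τ < c
          · simp only [aLt, decide_eq_true_eq, if_pos hx]
            have c2 : ¬ (m' + τ < x + τ) := by omega
            simp [c2]
          · simp only [aLt, decide_eq_true_eq, if_neg hx]
            have c2 : ¬ (m' + τ < c) := by omega
            simp [c2]

theorem inner_fold (τ t0 : Int) (V : List Int)
    (m : Int) (i : Nat) (h : ami V = some (m, i))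
    (s : Option Int × Option Int × Option Int) :
    (V.foldl (fun (p : (Option Int × Option Int × Option Int) × Int) load =>
        (if aLt (load + τ) p.1.1 then (some (load + τ), some t0, some p.2) else p.1, p.2 + 1))
      (s, 0)).1
      = if aLt (m + τ) s.1 then (some (m + τ), some t0, some ((i : Nat) : Int)) else s := by
  have := enum_fold τ t0 V m i h 0 s
  simpa using this

theorem key_elim_le {α : Type} (key : α → Int) (t : List α) (a : α) :
    key ((PySem.List.min? t key).elim a (fun m => if key m < key a then m else a)) ≤ key a := by
  rcases h : PySem.List.min? t key with _ | m
  · simp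
  · simp only [Option.elim_some]
    split <;> omega

theorem outer_fold (key : Int → Int) (m iv : Int) (L : List Int) :
    ∀ (a : Int),
      L.foldl (fun s task => if aLt (m + key task) s.1 then
            (some (m + key task), some task, some iv) else s)
          (some (m + key a), some a, some iv)
        = (some (m + key ((PySem.List.min? L key).elim a (fun b => if key b < key a then b else a))),
           some ((PySem.List.min? L key).elim a (fun b => if key b < key a then b else a)), some iv) := by
  induction L with
  | nil => intro a; simp [PySem.List.min?]
  | cons y L ih =>
    intro a
    rw [List.foldl_cons, min?_cons_elim]
    simp only [Option.elim_some]
    show List.foldl _ (if aLt (m + key y) (some (m + key a)) then _ else _) L = _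
    have ha : aLt (m + key y) (some (m + key a)) = decide (key y < key a) := by
      simp [aLt]
    rw [ha]
    by_cases hy : key y < key a
    · simp only [hy, decide_true, if_pos]
      rw [ih y]
      have hle := key_elim_le key L y
      rcases hm : PySem.List.min? L key with _ | mm <;>
        simp only [Option.elim_none, Option.elim_some] at hle ⊢
      · rw [if_pos hy]
      · split_ifs <;> first | rfl | omega
    · simp only [hy, decide_false, if_neg, Bool.false_eq_true, not_false_iff]
      rw [ih a]
      rcases hm : PySem.List.min? L key with _ | mm <;>
        simp only [Option.elim_none, Option.elim_some]
      · rw [if_neg hy]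
      · split_ifs <;> first | rfl | omega

theorem scan_eq (ts : List Int) (V : List Int)
    (m : Int) (i : Nat) (h : ami V = some (m, i)) (L : List Int) (bm : Int)
    (hbm : PySem.List.min? L (fun j => PySem.List.pyGetD ts j 0) = some bm) :
    aScan ts V L = (some (m + PySem.List.pyGetD ts bm 0), some bm, some ((i : Nat) : Int)) := by
  cases L with
  | nil => simp [PySem.List.min?] at hbm
  | cons x L' =>
    unfold aScan
    rw [PySem.List.foldl_congr_mem _ _
        (fun s task => if aLt (m + PySem.List.pyGetD ts task 0) s.1 then
            (some (m + PySem.List.pyGetD ts task 0), some task, some ((i : Nat) : Int)) else s) _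
        (fun acc task _ => inner_fold (PySem.List.pyGetD ts task 0) task V m i h acc)]
    rw [List.foldl_cons]
    have h1 : (if aLt (m + PySem.List.pyGetD ts x 0) ((none : Option Int), (none : Option Int), (none : Option Int)).1 then
          (some (m + PySem.List.pyGetD ts x 0), some x, some ((i : Nat) : Int))
          else ((none : Option Int), (none : Option Int), (none : Option Int)))
        = (some (m + PySem.List.pyGetD ts x 0), some x, some ((i : Nat) : Int)) := rfl
    rw [h1, outer_fold]
    rw [min?_cons_elim] at hbm
    rw [Option.some_inj] at hbm
    rw [hbm]

theorem sorted_snoc {key : Int → Int} (M : List Int) (z : Int) :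
    PySem.List.sorted (M ++ [z]) key false
      = PySem.List.insertBy (fun a b => decide (key a < key b)) z (PySem.List.sorted M key false) := by
  rw [PySem.List.sorted_eq_foldl_insertBy, PySem.List.sorted_eq_foldl_insertBy,
    List.foldl_append, List.foldl_cons, List.foldl_nil]

theorem min?_snoc {key : Int → Int} (M : List Int) (z : Int) :
    PySem.List.min? (M ++ [z]) key = mstep key (PySem.List.min? M key) z := by
  rw [min?_eq_foldl, min?_eq_foldl, List.foldl_append, List.foldl_cons, List.foldl_nil]

theorem sorted_cons_min {key : Int → Int} (L : List Int) (hnd : L.Nodup) (bm : Int)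
    (hbm : PySem.List.min? L key = some bm) :
    PySem.List.sorted L key false = bm :: PySem.List.sorted (L.erase bm) key false := by
  induction L using List.reverseRecOn with
  | nil => simp [PySem.List.min?] at hbm
  | append_singleton M z ih =>
    by_cases hM : M = []
    · subst hM
      simp only [List.nil_append] at hbm ⊢
      have hz : bm = z := by
        have h0 : PySem.List.min? [z] key = some z := rfl
        rw [h0, Option.some_inj] at hbm
        omega
      subst hz
      have e1 : ([bm] : List Int).erase bm = [] := by simp
      rw [e1]
      rfl
    · obtain ⟨mM, hmM⟩ : ∃ mM, PySem.List.min? M key = some mM := by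
        rcases hc : PySem.List.min? M key with _ | mM
        · exact absurd ((PySem.List.min?_eq_none_iff M key).mp hc) hM
        · exact ⟨mM, rfl⟩
      have hnd' := hnd
      rw [List.nodup_append] at hnd'
      have hndM : M.Nodup := hnd'.1
      have hzM : z ∉ M := fun hzm => hnd'.2.2 z hzm z (by simp) rfl
      have hbm2 : (if key z < key mM then some z else some mM) = some bm := by
        rw [← hbm, min?_snoc, hmM]; rfl
      by_cases hz : key z < key mM
      · rw [if_pos hz, Option.some_inj] at hbm2
        subst hbm2
        rw [List.erase_append_right _ hzM]
        have e1 : ([z] : List Int).erase z = [] := by simp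
        rw [e1, List.append_nil, sorted_snoc]
        rcases hs : PySem.List.sorted M key false with _ | ⟨hd, rest⟩
        · exact absurd ((PySem.List.sorted_eq_nil_iff M key false).mp hs) hM
        · have hhd : hd ∈ M := by
            rw [← PySem.List.mem_sorted M key false hd, hs]; exact List.mem_cons_self
          have hle : key mM ≤ key hd := PySem.List.min?_isMin hmM hd hhd
          show PySem.List.insertBy _ z (hd :: rest) = z :: hd :: rest
          simp only [PySem.List.insertBy]
          rw [if_pos (by simp; omega)]
      · rw [if_neg hz, Option.some_inj] at hbm2
        subst hbm2
        have hmem : mM ∈ M := PySem.List.min?_mem hmM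
        rw [List.erase_append_left _ hmem, sorted_snoc, sorted_snoc, ih hndM hmM]
        simp only [PySem.List.insertBy]
        rw [if_neg (by simp; omega)]

theorem loop_eq (ts : List Int) (nv : Int) (hnv : 1 ≤ nv) :
    ∀ (n : Nat) (L V alloc : List Int), L.length = n → L.Nodup → (V.length : Int) = nv →
      aLoop ts n L V alloc
        = bLoop ts (PySem.List.sorted L (fun j => PySem.List.pyGetD ts j 0) false) V alloc := by
  intro n
  induction n with
  | zero =>
    intro L V alloc hlen hnd hV
    have hL : L = [] := List.length_eq_zero_iff.mp hlen
    subst hL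
    rfl
  | succ n ih =>
    intro L V alloc hlen hnd hV
    cases L with
    | nil => simp at hlen
    | cons x L' =>
      obtain ⟨⟨m, i⟩, hami⟩ : ∃ p, ami V = some p := by
        cases V with
        | nil => exfalso; simp at hV; omega
        | cons v V' => exact ⟨_, rfl⟩
      obtain ⟨bm, hbm⟩ : ∃ bm, PySem.List.min? (x :: L')
          (fun j => PySem.List.pyGetD ts j 0) = some bm := by
        rw [min?_cons_elim]; exact ⟨_, rfl⟩
      have hmem : bm ∈ x :: L' := PySem.List.min?_mem hbm
      have h1 : PySem.List.min? V (fun x => x) = some m := ami_min? V m i hami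
      have h2 : PySem.List.index? V m = some i := ami_index? V m i hami
      rw [sorted_cons_min (x :: L') hnd bm hbm]
      show (if (x :: L').isEmpty then (alloc, V)
        else
          match aScan ts V (x :: L') with
          | (_, some bt, some bv) =>
              aLoop ts n ((PySem.List.remove? (x :: L') bt).getD (x :: L'))
                (V.modify bv.toNat (· + PySem.List.pyGetD ts bt 0))
                (alloc.set bt.toNat bv)
          | _ => (alloc, V)) = _
      rw [scan_eq ts V m i hami (x :: L') bm hbm]
      simp only [List.isEmpty_cons, Bool.false_eq_true, if_false]
      show aLoop ts n ((PySem.List.remove? (x :: L') bm).getD (x :: L'))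
          (V.modify ((i : Int)).toNat (· + PySem.List.pyGetD ts bm 0))
          (alloc.set bm.toNat ((i : Nat) : Int)) = _
      rw [PySem.List.remove?_eq_some_erase _ bm hmem, Option.getD_some, Int.toNat_natCast]
      show _ = bLoop ts (bm :: PySem.List.sorted ((x :: L').erase bm) (fun j => PySem.List.pyGetD ts j 0) false) V alloc
      rw [show bLoop ts (bm :: PySem.List.sorted ((x :: L').erase bm) (fun j => PySem.List.pyGetD ts j 0) false) V alloc
          = bLoop ts (PySem.List.sorted ((x :: L').erase bm) (fun j => PySem.List.pyGetD ts j 0) false)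
              (V.modify ((PySem.List.index? V ((PySem.List.min? V (fun x => x)).getD 0)).getD 0) (· + PySem.List.pyGetD ts bm 0))
              (alloc.set bm.toNat (((PySem.List.index? V ((PySem.List.min? V (fun x => x)).getD 0)).getD 0 : Nat) : Int)) from rfl]
      rw [h1, Option.getD_some, h2, Option.getD_some]
      exact ih _ _ _ (by rw [List.length_erase_of_mem hmem]; simp at hlen ⊢; omega)
        (hnd.erase bm) (by rw [List.length_modify]; exact hV)

theorem min_min_scheduler_eq_alt (ts : List Int) (nv : Int) (h : 1 ≤ nv) :
    min_min_scheduler ts nv = min_min_scheduler_alt ts nv := by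
  have hp : aLoop ts (PySem.List.pyRange 0 (ts.length : Int) 1).length
        (PySem.List.pyRange 0 (ts.length : Int) 1)
        (List.replicate nv.toNat 0) (List.replicate ts.length (-1))
      = bLoop ts (PySem.List.sorted (PySem.List.pyRange 0 (ts.length : Int) 1)
          (fun i => PySem.List.pyGetD ts i 0) false)
        (List.replicate nv.toNat 0) (List.replicate ts.length (-1)) :=
    loop_eq ts nv h _ _ _ _ rfl
      (by rw [PySem.List.pyRange_zero_natCast]
          exact List.Nodup.map (fun a b hh => by omega) List.nodup_range)
      (by simp [Int.toNat_of_nonneg (by omega : (0:Int) ≤ nv)])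
  show ((aLoop ts (PySem.List.pyRange 0 (ts.length : Int) 1).length
        (PySem.List.pyRange 0 (ts.length : Int) 1)
        (List.replicate nv.toNat 0) (List.replicate ts.length (-1))).1,
      (PySem.List.max? (aLoop ts (PySem.List.pyRange 0 (ts.length : Int) 1).length
        (PySem.List.pyRange 0 (ts.length : Int) 1)
        (List.replicate nv.toNat 0) (List.replicate ts.length (-1))).2 (fun x => x)).getD 0)
    = ((bLoop ts (PySem.List.sorted (PySem.List.pyRange 0 (ts.length : Int) 1)
          (fun i => PySem.List.pyGetD ts i 0) false)
        (List.replicate nv.toNat 0) (List.replicate ts.length (-1))).1,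
      (PySem.List.max? (bLoop ts (PySem.List.sorted (PySem.List.pyRange 0 (ts.length : Int) 1)
          (fun i => PySem.List.pyGetD ts i 0) false)
        (List.replicate nv.toNat 0) (List.replicate ts.length (-1))).2 (fun x => x)).getD 0)
  rw [hp]

-- ===== VERDICT (by name: the statement is the Claim_ definition above) =====
theorem min_min_scheduler_spec : Claim_equal_min_min_scheduler := by
  intro task_times num_vms _hdom hpre
  unfold Spec_min_min_scheduler
  exact min_min_scheduler_eq_alt task_times num_vms hpre
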